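-- pv_equiv track=rewrite | github.com/nikiitin/RING-5 | src/core/services/data_services/pattern_index_service.py | format_entry_display
-- ===== SOURCE A (Python) =====
-- from typing import Dict, List
--
-- def format_entry_display(entry: str, positions: List[str]) -> str:
--     """
--     Format entry for display (e.g., "0_1" -> "l{0}_cntrl{1}").
--
--     Args:
--         entry: Entry like "0_1"
--         positions: Position labels like ["l", "cntrl"]
--
--     Returns:
--         Formatted string for display
--
--     Examples:
--         >>> PatternIndexService.format_entry_display("0_1", ["l", "cntrl"])
--         'l{0}_cntrl{1}'
--         >>> PatternIndexService.format_entry_display("2", ["cpu"])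
--         'cpu{2}'
--         >>> PatternIndexService.format_entry_display("0_1_2", ["l", "cntrl"])
--         'l{0}_cntrl{1}_2'
--     """
--     parts = entry.split("_")
--     formatted_parts: List[str] = []
--
--     for i, part in enumerate(parts):
--         if i < len(positions):
--             formatted_parts.append(f"{positions[i]}{{{part}}}")
--         else:
--             formatted_parts.append(part)
--
--     return "_".join(formatted_parts)
-- ===== SOURCE B (Python) =====
-- def format_entry_display(entry: str, positions):
--     def go(parts, labels):
--         head = f"{labels[0]}{{{parts[0]}}}" if labels else parts[0]
--         if len(parts) == 1:
--             return head
--         return head + "_" + go(parts[1:], labels[1:])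
--     return go(entry.split("_"), positions)
-- ===== Notes on version B (the rewrite author's own statement) =====
-- stated objective: alternative
-- what changed: Replaces the indexed loop that appends into a list and then joins by a direct recursion over (parts, labels) that consumes both lists and builds the result string by concatenation, with no intermediate list and no join.
import Mathlib
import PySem

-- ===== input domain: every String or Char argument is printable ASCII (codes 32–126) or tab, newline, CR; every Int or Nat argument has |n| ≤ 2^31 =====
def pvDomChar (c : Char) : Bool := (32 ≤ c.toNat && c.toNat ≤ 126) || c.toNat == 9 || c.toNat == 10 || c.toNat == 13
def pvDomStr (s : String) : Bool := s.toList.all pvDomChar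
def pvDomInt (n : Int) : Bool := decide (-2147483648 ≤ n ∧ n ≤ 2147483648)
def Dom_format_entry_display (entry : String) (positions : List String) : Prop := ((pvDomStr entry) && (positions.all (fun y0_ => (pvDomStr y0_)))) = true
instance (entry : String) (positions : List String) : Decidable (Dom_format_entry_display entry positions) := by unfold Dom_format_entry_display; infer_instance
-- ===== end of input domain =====

-- B replaces A's indexed loop (append into a list, then join) by a direct recursion over
-- (parts, labels) that builds the result string by concatenation; alternative decomposition, equal on all inputs.

-- ===== PORT A =====
-- A: for i, part in enumerate(parts): append label{part} if i < len(positions) else part; join with "_".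
-- sep "_" is nonempty so split? is some; .getD [] is exact.
def format_entry_display (entry : String) (positions : List String) : String :=
  let parts := (PySem.Str.split? entry "_").getD []
  let st := parts.foldl
    (fun (st : Int × List String) part =>
      (st.1 + 1,
       st.2 ++ [if st.1 < (positions.length : Int)
                then PySem.List.pyGetD positions st.1 "" ++ "{" ++ part ++ "}"
                else part]))
    (0, [])
  PySem.Str.join "_" st.2

-- ===== PORT B =====
-- B's inner go(parts, labels): head = labels[0]{parts[0]} if labels else parts[0];
-- return head if len(parts) == 1 else head + "_" + go(parts[1:], labels[1:]).
-- The [] case is unreachable in B (split("_") yields a nonempty list and the recursion stops at one element).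
def fedGo : List String → List String → String
  | [], _ => ""
  | p :: ps, labels =>
    let head := match labels with
      | [] => p
      | l :: _ => l ++ "{" ++ p ++ "}"
    match ps with
    | [] => head
    | _ :: _ => head ++ "_" ++ fedGo ps (labels.drop 1)

def format_entry_display_alt (entry : String) (positions : List String) : String :=
  fedGo ((PySem.Str.split? entry "_").getD []) positions

-- ===== PRECONDITION & SPEC =====
def Spec_format_entry_display (entry : String) (positions : List String) (out : String) : Prop := out = format_entry_display_alt entry positions
instance (entry : String) (positions : List String) (out : String) : Decidable (Spec_format_entry_display entry positions out) := by unfold Spec_format_entry_display; infer_instance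

-- ===== CLAIM (what is proved, stated in full; the proofs are below) =====
def Claim_equal_format_entry_display : Prop := ∀ (entry : String) (positions : List String), Dom_format_entry_display entry positions → Spec_format_entry_display entry positions (format_entry_display entry positions)

-- ===== LEMMAS AND PROOFS =====

lemma strJoin_cons_of_ne (x : String) (rest : List String) (h : rest ≠ []) :
    PySem.Str.join "_" (x :: rest) = x ++ "_" ++ PySem.Str.join "_" rest := by
  cases rest with
  | nil => exact absurd rfl h
  | cons q t =>
    refine String.toList_injective ?_
    simp [PySem.Str.toList_join, PySem.Chars.join_cons_cons]

lemma strJoin_single (p : String) : PySem.Str.join "_" [p] = p := by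
  refine String.toList_injective ?_
  simp [PySem.Str.toList_join, PySem.Chars.join_singleton]

lemma strJoin_empty : PySem.Str.join "_" [] = "" := by
  refine String.toList_injective ?_
  simp [PySem.Str.toList_join, PySem.Chars.join_nil]

-- Unfolding equation for B's recursion on a list of at least two parts.
lemma fedGo_cons_cons (p q : String) (qs labels : List String) :
    fedGo (p :: q :: qs) labels
      = (match labels with | [] => p | l :: _ => l ++ "{" ++ p ++ "}") ++ "_"
          ++ fedGo (q :: qs) (labels.drop 1) := by
  cases labels <;> simp [fedGo]

-- B's recursion computes exactly "labeled zip head + raw tail, joined with '_'".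
lemma fedGo_eq : ∀ (parts P : List String),
    fedGo parts P
      = PySem.Str.join "_"
          ((P.zip parts).map (fun lp => lp.1 ++ "{" ++ lp.2 ++ "}") ++ parts.drop P.length) := by
  intro parts
  induction parts with
  | nil => intro P; simp [fedGo, strJoin_empty]
  | cons p ps ih =>
    intro P
    cases ps with
    | nil =>
      cases P with
      | nil => simp [fedGo, strJoin_single]
      | cons l ls => simp [fedGo, strJoin_single]
    | cons q qs =>
      cases P with
      | nil =>
        rw [fedGo_cons_cons]
        simp only [List.drop_one, List.tail_nil, ih, List.zip_nil_left, List.map_nil,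
          List.nil_append, List.length_nil, List.drop_zero]
        rw [strJoin_cons_of_ne p _ (by simp)]
      | cons l ls =>
        have hne : ((ls.zip (q :: qs)).map (fun lp => lp.1 ++ "{" ++ lp.2 ++ "}")
            ++ (q :: qs).drop ls.length) ≠ [] := by
          cases ls with
          | nil => simp
          | cons m ms => simp
        rw [fedGo_cons_cons]
        simp only [List.drop_succ_cons, List.drop_zero, ih, List.zip_cons_cons, List.map_cons,
          List.length_cons, List.cons_append]
        rw [strJoin_cons_of_ne _ _ hne]

-- Loop invariant: starting at index i with accumulator acc, A's fold produces acc, then the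
-- labeled zip of the remaining positions with parts, then the unlabeled leftover parts.
lemma fold_invariant (P : List String) (parts : List String) :
    ∀ (i : Nat) (acc : List String),
      (parts.foldl
        (fun (st : Int × List String) part =>
          (st.1 + 1,
           st.2 ++ [if st.1 < (P.length : Int)
                    then PySem.List.pyGetD P st.1 "" ++ "{" ++ part ++ "}"
                    else part]))
        ((i : Int), acc)).2
      = acc ++ ((P.drop i).zip parts).map (fun lp => lp.1 ++ "{" ++ lp.2 ++ "}")
            ++ parts.drop (P.drop i).length := by
  induction parts with
  | nil => intro i acc; simp
  | cons p ps ih =>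
    intro i acc
    by_cases h : i < P.length
    · have hdrop : P.drop i = P[i] :: P.drop (i + 1) := List.drop_eq_getElem_cons h
      have hget : PySem.List.pyGetD P (i : Int) "" = P[i] := by
        rw [PySem.List.pyGetD_natCast]
        exact List.getD_eq_getElem P "" h
      have hcast : ((i : Int) + 1) = ((i + 1 : Nat) : Int) := by push_cast; ring
      simp only [List.foldl_cons, if_pos (by exact_mod_cast h : (i : Int) < (P.length : Int)), hget,
        hcast, ih]
      rw [hdrop, List.zip_cons_cons, List.map_cons]
      simp only [List.length_cons, List.append_assoc, List.cons_append, List.nil_append,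
        List.append_cancel_left_eq, List.cons.injEq, true_and]
      rw [List.drop_succ_cons]
    · have hdrop : P.drop i = [] := List.drop_eq_nil_of_le (by omega)
      have hdrop' : P.drop (i + 1) = [] := List.drop_eq_nil_of_le (by omega)
      have hcast : ((i : Int) + 1) = ((i + 1 : Nat) : Int) := by push_cast; ring
      simp only [List.foldl_cons, if_neg (by exact_mod_cast h : ¬ (i : Int) < (P.length : Int)),
        hcast, ih, hdrop, hdrop']
      simp

-- ===== VERDICT (by name: the statement is the Claim_ definition above) =====
theorem format_entry_display_spec : Claim_equal_format_entry_display := by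
  intro entry positions _
  unfold Spec_format_entry_display format_entry_display format_entry_display_alt
  have h := fold_invariant positions ((PySem.Str.split? entry "_").getD []) 0 []
  simp only [Nat.cast_zero] at h
  simp [h, fedGo_eq]
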